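-- pv_equiv track=rewrite | github.com/jeekim2/algostudy_ind | Problems/2210/ans_2210_JHK.py | track_board
-- ===== SOURCE A (Python) =====
-- def track_board(board, start, depth):
--     x, y = start % 5, start // 5
--     if depth >= 6:
--         return [""]
--     res = []
--     defNum = str(board[start])
--     if x != 0:
--         for nums in track_board(board, y * 5 + x - 1, depth + 1):
--             res.append(defNum + nums)
--     if y != 0:
--         for nums in track_board(board, (y - 1) * 5 + x, depth + 1):
--             res.append(defNum + nums)
--     if x != 4:
--         for nums in track_board(board, y * 5 + x + 1, depth + 1):
--             res.append(defNum + nums)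
--     if y != 4:
--         for nums in track_board(board, (y + 1) * 5 + x, depth + 1):
--             res.append(defNum + nums)
--
--     return res
-- ===== SOURCE B (Python) =====
-- def track_board(board, start, depth):
--     # Iterative level-by-level (BFS frontier) expansion instead of recursive DFS.
--     if depth >= 6:
--         return [""]
--     frontier = [(start, "")]
--     for _ in range(6 - depth):
--         nxt = []
--         for pos, prefix in frontier:
--             x, y = pos % 5, pos // 5
--             s = prefix + str(board[pos])
--             if x != 0:
--                 nxt.append((y * 5 + x - 1, s))
--             if y != 0:
--                 nxt.append(((y - 1) * 5 + x, s))
--             if x != 4: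
--                 nxt.append((y * 5 + x + 1, s))
--             if y != 4:
--                 nxt.append(((y + 1) * 5 + x, s))
--         frontier = nxt
--     return [p for _, p in frontier]
-- ===== Notes on version B (the rewrite author's own statement) =====
-- stated objective: alternative
-- what changed: Replaces A's recursive DFS (append per neighbor, one recursive call per branch) by an iterative breadth-first frontier: a list of (position, prefix) pairs expanded level by level for 6-depth rounds, returning the final prefixes; left-to-right leaf order coincides with DFS order.
-- outside the precondition, e.g. on track_board([1, 2, 3, 4, 5], 0, 5): A returns ['1', '1'], B returns ['1', '1']
import Mathlib
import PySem

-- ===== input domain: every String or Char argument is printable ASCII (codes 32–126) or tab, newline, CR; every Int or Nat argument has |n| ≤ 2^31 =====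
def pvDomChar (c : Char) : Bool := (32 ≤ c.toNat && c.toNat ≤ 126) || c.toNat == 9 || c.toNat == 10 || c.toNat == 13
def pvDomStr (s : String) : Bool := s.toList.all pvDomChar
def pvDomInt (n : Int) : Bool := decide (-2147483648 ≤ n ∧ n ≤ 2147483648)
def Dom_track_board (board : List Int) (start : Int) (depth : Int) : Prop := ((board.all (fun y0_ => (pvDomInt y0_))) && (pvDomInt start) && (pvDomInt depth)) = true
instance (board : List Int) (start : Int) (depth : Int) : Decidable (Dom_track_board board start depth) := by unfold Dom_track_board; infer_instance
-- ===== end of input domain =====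

-- B replaces A's recursive DFS by an iterative level-by-level frontier expansion (alternative
-- decomposition, same cost); return-value equivalence on the natural 5×5-board domain.

-- ===== PORT A =====
-- Literal port of A's recursive DFS.  board[start] is PySem.List.pyGet?; the none
-- (IndexError) case returns [] and is excluded by Pre_track_board.
def track_board (board : List Int) (start : Int) (depth : Int) : List String :=
  let x := PySem.Int.mod start 5
  let y := PySem.Int.floordiv start 5
  if depth ≥ 6 then [""]
  else
    match PySem.List.pyGet? board start with
    | none => []
    | some v =>
      let defNum := PySem.Int.toStr v
      let res : List String := []
      let res := if x ≠ 0 then res ++ (track_board board (y * 5 + x - 1) (depth + 1)).map (fun s => defNum ++ s) else res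
      let res := if y ≠ 0 then res ++ (track_board board ((y - 1) * 5 + x) (depth + 1)).map (fun s => defNum ++ s) else res
      let res := if x ≠ 4 then res ++ (track_board board (y * 5 + x + 1) (depth + 1)).map (fun s => defNum ++ s) else res
      let res := if y ≠ 4 then res ++ (track_board board ((y + 1) * 5 + x) (depth + 1)).map (fun s => defNum ++ s) else res
      res
termination_by (6 - depth).toNat
decreasing_by all_goals omega

-- ===== PORT B =====
-- One round of B's inner loop: expand every (position, prefix) pair of the frontier
-- into its in-bounds neighbours (appends to nxt = flatMap of the four guarded pushes).
def pvExpand (board : List Int) (frontier : List (Int × String)) : List (Int × String) :=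
  frontier.flatMap (fun pp =>
    let x := PySem.Int.mod pp.1 5
    let y := PySem.Int.floordiv pp.1 5
    match PySem.List.pyGet? board pp.1 with
    | none => []  -- IndexError in Python; outside Pre_track_board
    | some v =>
      let s := pp.2 ++ PySem.Int.toStr v
      (if x ≠ 0 then [(y * 5 + x - 1, s)] else []) ++
      (if y ≠ 0 then [((y - 1) * 5 + x, s)] else []) ++
      (if x ≠ 4 then [(y * 5 + x + 1, s)] else []) ++
      (if y ≠ 4 then [((y + 1) * 5 + x, s)] else []))

-- B's for-loop 'for _ in range(6 - depth)' iterates (6 - depth).toNat times (6 - depth > 0 here).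
def track_board_alt (board : List Int) (start : Int) (depth : Int) : List String :=
  if depth ≥ 6 then [""]
  else
    let frontier := (List.range (6 - depth).toNat).foldl (fun fr _ => pvExpand board fr) [(start, "")]
    frontier.map (fun pp => pp.2)

-- ===== PRECONDITION & SPEC =====
-- Pre_ restricts depth < 6 calls to the problem's natural domain — a board of (at least) 25 cells
-- and a start index on the 5×5 grid; outside it the walk leaves the board, where Python's
-- negative-index wraparound reads accidental cells or raises IndexError.
def Pre_track_board (board : List Int) (start : Int) (depth : Int) : Prop :=
  depth ≥ 6 ∨ (0 ≤ start ∧ start < 25 ∧ 25 ≤ (board.length : Int))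
instance (board : List Int) (start : Int) (depth : Int) : Decidable (Pre_track_board board start depth) := by unfold Pre_track_board; infer_instance

def pvWitness_track_board : List Int × Int × Int :=
  ([1,2,3,4,5,6,7,8,9,10,11,12,13,14,15,16,17,18,19,20,21,22,23,24,25], 7, 4)

def Spec_track_board (board : List Int) (start : Int) (depth : Int) (out : List String) : Prop := out = track_board_alt board start depth
instance (board : List Int) (start : Int) (depth : Int) (out : List String) : Decidable (Spec_track_board board start depth out) := by unfold Spec_track_board; infer_instance

-- ===== CLAIM (what is proved, stated in full; the proofs are below) =====
def Claim_equal_track_board : Prop := ∀ (board : List Int) (start : Int) (depth : Int), Dom_track_board board start depth → Pre_track_board board start depth → Spec_track_board board start depth (track_board board start depth)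

-- ===== LEMMAS AND PROOFS =====

-- A fold that ignores the list's elements is function iteration.
theorem pv_foldl_const {α β : Type} (g : β → β) (l : List α) (init : β) :
    l.foldl (fun acc _ => g acc) init = g^[l.length] init := by
  induction l generalizing init with
  | nil => rfl
  | cons a l ih => simp [List.foldl_cons, ih, Function.iterate_succ_apply]

-- In-bounds positions expand to in-bounds positions.
theorem pv_expand_inv (board : List Int) (fr : List (Int × String))
    (hfr : ∀ pp ∈ fr, 0 ≤ pp.1 ∧ pp.1 < 25) :
    ∀ pp ∈ pvExpand board fr, 0 ≤ pp.1 ∧ pp.1 < 25 := by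
  intro pp hpp
  simp only [pvExpand, List.mem_flatMap] at hpp
  obtain ⟨qq, hq, hpp⟩ := hpp
  obtain ⟨h0, h25⟩ := hfr qq hq
  rw [PySem.Int.mod_eq_emod_of_pos (by omega), PySem.Int.floordiv_eq_ediv_of_pos (by omega)] at hpp
  rcases hget : PySem.List.pyGet? board qq.1 with _ | v <;> simp only [hget] at hpp
  · simp at hpp
  · simp only [List.mem_append] at hpp
    rcases hpp with ((h | h) | h) | h <;>
    · split_ifs at h with hg <;> simp_all
      all_goals omega

-- The in-range lookup succeeds.
theorem pv_get_some (board : List Int) (p : Int) (h0 : 0 ≤ p) (h25 : p < 25)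
    (hlen : 25 ≤ (board.length : Int)) :
    ∃ v, PySem.List.pyGet? board p = some v :=
  ⟨_, PySem.List.pyGet?_eq_some_getElem board h0 (by omega)⟩

-- Unfolding of A at a depth < 6 where the lookup succeeds.
theorem pv_trackA_unfold (board : List Int) (p d : Int) (hd : ¬ d ≥ 6) (v : Int)
    (hget : PySem.List.pyGet? board p = some v) :
    track_board board p d =
      (if PySem.Int.mod p 5 ≠ 0 then (track_board board (PySem.Int.floordiv p 5 * 5 + PySem.Int.mod p 5 - 1) (d + 1)).map (fun s => PySem.Int.toStr v ++ s) else []) ++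
      (if PySem.Int.floordiv p 5 ≠ 0 then (track_board board ((PySem.Int.floordiv p 5 - 1) * 5 + PySem.Int.mod p 5) (d + 1)).map (fun s => PySem.Int.toStr v ++ s) else []) ++
      (if PySem.Int.mod p 5 ≠ 4 then (track_board board (PySem.Int.floordiv p 5 * 5 + PySem.Int.mod p 5 + 1) (d + 1)).map (fun s => PySem.Int.toStr v ++ s) else []) ++
      (if PySem.Int.floordiv p 5 ≠ 4 then (track_board board ((PySem.Int.floordiv p 5 + 1) * 5 + PySem.Int.mod p 5) (d + 1)).map (fun s => PySem.Int.toStr v ++ s) else []) := by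
  rw [track_board]
  simp only [hd, if_false, hget]
  split_ifs <;> simp_all

-- Core invariant: after k rounds of expansion the frontier's prefixes are exactly the
-- frontier's prefixes combined with A's results at depth 6 - k.
theorem pv_levels (board : List Int) (hlen : 25 ≤ (board.length : Int)) :
    ∀ (k : Nat) (fr : List (Int × String)), (∀ pp ∈ fr, 0 ≤ pp.1 ∧ pp.1 < 25) →
      ((pvExpand board)^[k] fr).map (fun pp => pp.2)
        = fr.flatMap (fun pp => (track_board board pp.1 (6 - (k : Int))).map (fun s => pp.2 ++ s)) := by
  intro k
  induction k with
  | zero =>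
    intro fr _
    rw [show ((6 : Int) - ((0 : Nat) : Int)) = 6 by norm_num]
    have h6 : ∀ p : Int, track_board board p 6 = [""] := by
      intro p; rw [track_board]; simp
    simp [h6, ← List.map_eq_flatMap]
  | succ k ih =>
    intro fr hfr
    rw [Function.iterate_succ_apply, ih (pvExpand board fr) (pv_expand_inv board fr hfr)]
    unfold pvExpand
    rw [List.flatMap_assoc]
    apply List.flatMap_congr
    intro pp hpp
    obtain ⟨h0, h25⟩ := hfr pp hpp
    obtain ⟨v, hget⟩ := pv_get_some board pp.1 h0 h25 hlen
    have hd : ¬ ((6 : Int) - ((k : Int) + 1) ≥ 6) := by omega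
    rw [show (((k + 1 : Nat) : Int)) = (k : Int) + 1 by push_cast; ring]
    rw [pv_trackA_unfold board pp.1 _ hd v hget]
    rw [show (6 : Int) - ((k : Int) + 1) + 1 = 6 - (k : Int) by ring]
    simp only [hget, List.map_append, List.flatMap_append]
    congr 1
    · congr 1
      · congr 1
        · split_ifs <;> simp [List.map_map, Function.comp, String.append_assoc]
        · split_ifs <;> simp [List.map_map, Function.comp, String.append_assoc]
      · split_ifs <;> simp [List.map_map, Function.comp, String.append_assoc]
    · split_ifs <;> simp [List.map_map, Function.comp, String.append_assoc]

-- ===== VERDICT (by name: the statement is the Claim_ definition above) =====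
theorem track_board_spec : Claim_equal_track_board := by
  intro board start depth _ hpre
  unfold Spec_track_board track_board_alt
  by_cases hd : depth ≥ 6
  · rw [track_board]
    simp [hd]
  · simp only [hd, if_false]
    rcases hpre with h | ⟨h0, h25, hlen⟩
    · exact absurd h hd
    rw [pv_foldl_const, List.length_range]
    rw [pv_levels board hlen ((6 - depth).toNat) [(start, "")] (by simp; omega)]
    rw [show ((6 : Int) - ((6 - depth).toNat : Int)) = depth by omega]
    simp [List.flatMap]
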